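-- pv_equiv track=rewrite | github.com/MrBrantCode/unitest_baseline | mut_generate/mist_train_cf/cf_104827/solution.py | sum_last_three_primes
-- ===== SOURCE A (Python) =====
-- def sum_last_three_primes(lst):
--     def is_prime(n):
--         if n <= 1:
--             return False
--         for i in range(2, int(n ** 0.5) + 1):
--             if n % i == 0:
--                 return False
--         return True
--
--     primes = [num for num in lst if is_prime(num)]
--     return sum(primes[-3:])
-- ===== SOURCE B (Python) =====
-- def sum_last_three_primes(lst):
--     def is_prime(n):
--         if n <= 1:
--             return False
--         for i in range(2, int(n ** 0.5) + 1):
--             if n % i == 0: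
--                 return False
--         return True
--
--     total = 0
--     count = 0
--     for num in reversed(lst):
--         if count == 3:
--             break
--         if is_prime(num):
--             total += num
--             count += 1
--     return total
-- ===== Notes on version B (the rewrite author's own statement) =====
-- stated objective: alternative
-- what changed: B scans the list from the back accumulating a running sum of primes and stops after finding three, instead of building the full filtered list and summing its last-3 slice.
import Mathlib
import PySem

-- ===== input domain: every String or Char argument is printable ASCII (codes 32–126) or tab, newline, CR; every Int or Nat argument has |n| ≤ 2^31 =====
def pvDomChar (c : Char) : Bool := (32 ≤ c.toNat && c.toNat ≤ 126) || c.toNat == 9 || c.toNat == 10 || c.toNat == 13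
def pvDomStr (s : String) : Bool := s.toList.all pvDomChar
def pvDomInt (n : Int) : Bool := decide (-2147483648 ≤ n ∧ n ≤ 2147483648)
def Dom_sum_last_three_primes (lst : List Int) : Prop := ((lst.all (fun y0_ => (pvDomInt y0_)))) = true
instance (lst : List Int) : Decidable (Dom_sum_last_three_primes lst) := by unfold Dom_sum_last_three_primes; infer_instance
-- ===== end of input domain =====

-- B scans the list from the back, summing primes and stopping after three, instead of summing the last-3 slice of the full filtered list (alternative decomposition, same worst-case cost).


-- shared helper: the inner is_prime of both Source A and Source B (identical source).
-- int(n ** 0.5) is ported as Nat.sqrt: for 1 < n ≤ 2^31 the correctly-rounded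
-- float sqrt never crosses an integer boundary, so the two agree on the domain.
def pvIsPrime (n : Int) : Bool :=
  if n ≤ 1 then false
  else (PySem.List.pyRange 2 ((Nat.sqrt n.toNat : Int) + 1) 1).all
    (fun i => !(PySem.Int.mod n i == 0))

-- ===== PORT A =====
def sum_last_three_primes (lst : List Int) : Int :=
  let primes := lst.filter (fun num => pvIsPrime num)
  (PySem.List.slice primes (some (-3)) none).sum

-- ===== PORT B =====
def pvAltLoop : List Int → Int → Nat → Int
  | [], total, _ => total
  | num :: rest, total, count =>
    if count == 3 then total
    else if pvIsPrime num then pvAltLoop rest (total + num) (count + 1)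
    else pvAltLoop rest total count

def sum_last_three_primes_alt (lst : List Int) : Int :=
  pvAltLoop lst.reverse 0 0

-- ===== PRECONDITION & SPEC =====
def Spec_sum_last_three_primes (lst : List Int) (out : Int) : Prop := out = sum_last_three_primes_alt lst
instance (lst : List Int) (out : Int) : Decidable (Spec_sum_last_three_primes lst out) := by unfold Spec_sum_last_three_primes; infer_instance

-- ===== CLAIM (what is proved, stated in full; the proofs are below) =====
def Claim_equal_sum_last_three_primes : Prop := ∀ (lst : List Int), Dom_sum_last_three_primes lst → Spec_sum_last_three_primes lst (sum_last_three_primes lst)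

-- ===== LEMMAS AND PROOFS =====

-- B's loop sums the first (3 - count) primes of its remaining input.
theorem pvAltLoop_eq (l : List Int) : ∀ (total : Int) (c : Nat), c ≤ 3 →
    pvAltLoop l total c = total + ((l.filter pvIsPrime).take (3 - c)).sum := by
  induction l with
  | nil => intro total c _; simp [pvAltLoop]
  | cons num rest ih =>
    intro total c hc
    by_cases h3 : c = 3
    · subst h3; simp [pvAltLoop]
    · have hlt : c < 3 := lt_of_le_of_ne hc h3
      by_cases hp : pvIsPrime num
      · have htake : 3 - c = (3 - (c + 1)) + 1 := by omega
        simp only [pvAltLoop, beq_iff_eq, if_neg h3, if_pos hp,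
          List.filter_cons_of_pos hp, htake, List.take_succ_cons, List.sum_cons]
        rw [ih (total + num) (c + 1) (by omega)]
        ring
      · simp only [pvAltLoop, beq_iff_eq, if_neg h3, if_neg hp,
          List.filter_cons_of_neg hp]
        exact ih total c hc

theorem sum_last_three_primes_spec : Claim_equal_sum_last_three_primes := by
  intro lst _
  show sum_last_three_primes lst = sum_last_three_primes_alt lst
  simp only [sum_last_three_primes, sum_last_three_primes_alt]
  rw [pvAltLoop_eq _ 0 0 (by omega)]
  rw [PySem.List.slice_from_neg_ofNat _ 3 (by omega)]
  rw [List.filter_reverse]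
  show (List.drop ((lst.filter pvIsPrime).length - 3) (lst.filter pvIsPrime)).sum
      = 0 + ((lst.filter pvIsPrime).reverse.take (3 - 0)).sum
  set primes := lst.filter pvIsPrime with hp
  have h : primes.reverse.take (3 - 0) = (primes.drop (primes.length - 3)).reverse := by
    rw [List.take_reverse]
  rw [h, List.sum_reverse, zero_add]
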